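-- pv_equiv track=rewrite | github.com/jwzj720/accurate-heatsheets | pdf_parser/pdf_parsing.py | split_text_at_ranges
-- ===== SOURCE A (Python) =====
-- def split_text_at_ranges(input_string, split_ranges):
--     result = []
--     start_index = 0
--
--     for split_range in split_ranges:
--         if isinstance(split_range, tuple) and len(split_range) == 2:
--             split_start, split_end = split_range
--
--             if 0 <= split_start < split_end <= len(input_string):
--                 # Add the part before the range
--                 result.append(input_string[start_index:split_start])
--
--                 # Move the start index to the end of the range
--                 start_index = split_end
--
--     # Append the remaining part of the string
--     result.append(input_string[start_index:])
--
--     return result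
-- ===== SOURCE B (Python) =====
-- def _pair_slices(s, bs):
--     if len(bs) < 2:
--         return []
--     return [s[bs[0]:bs[1]]] + _pair_slices(s, bs[2:])
--
--
-- def split_text_at_ranges(input_string, split_ranges):
--     n = len(input_string)
--     boundaries = [0]
--     for split_range in split_ranges:
--         if isinstance(split_range, tuple) and len(split_range) == 2:
--             s, e = split_range
--             if 0 <= s < e <= n:
--                 boundaries += [s, e]
--     boundaries.append(n)
--     return _pair_slices(input_string, boundaries)
-- ===== Notes on version B (the rewrite author's own statement) =====
-- stated objective: alternative
-- what changed: Instead of threading a start_index through the loop and slicing as it goes, B first builds a flat boundary list [0, s1, e1, ..., sk, ek, n] of validated range endpoints and then slices the string at consecutive boundary pairs in a second recursive pass.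
import Mathlib
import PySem

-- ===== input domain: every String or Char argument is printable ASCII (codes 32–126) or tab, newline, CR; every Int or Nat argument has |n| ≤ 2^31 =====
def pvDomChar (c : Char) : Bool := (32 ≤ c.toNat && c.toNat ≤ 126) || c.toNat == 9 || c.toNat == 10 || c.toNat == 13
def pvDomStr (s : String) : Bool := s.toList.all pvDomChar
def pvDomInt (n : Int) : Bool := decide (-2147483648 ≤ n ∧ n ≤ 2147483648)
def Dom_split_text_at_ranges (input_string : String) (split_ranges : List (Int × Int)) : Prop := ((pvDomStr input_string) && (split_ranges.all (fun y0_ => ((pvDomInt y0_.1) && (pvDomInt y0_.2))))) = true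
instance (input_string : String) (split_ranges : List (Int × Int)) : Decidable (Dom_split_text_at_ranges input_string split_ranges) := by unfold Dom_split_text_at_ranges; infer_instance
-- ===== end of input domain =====

-- B replaces A's threaded start_index with a flat boundary list [0,s1,e1,…,sk,ek,n] built in
-- one validating pass and sliced at consecutive pairs in a second pass (alternative decomposition, same cost).


-- ===== PORT A =====
def split_text_at_ranges (input_string : String) (split_ranges : List (Int × Int)) : List String :=
  let st := split_ranges.foldl
    (fun (st : List String × Int) split_range =>
      if 0 ≤ split_range.1 ∧ split_range.1 < split_range.2 ∧ split_range.2 ≤ PySem.Str.len input_string then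
        (st.1 ++ [PySem.Str.slice input_string (some st.2) (some split_range.1)], split_range.2)
      else st)
    ([], 0)
  st.1 ++ [PySem.Str.slice input_string (some st.2) none]

-- ===== PORT B =====
def pairSlices (s : String) : List Int → List String
  | a :: b :: rest => [PySem.Str.slice s (some a) (some b)] ++ pairSlices s rest
  | _ => []

def split_text_at_ranges_alt (input_string : String) (split_ranges : List (Int × Int)) : List String :=
  let n := PySem.Str.len input_string
  let boundaries := split_ranges.foldl
    (fun (acc : List Int) split_range =>
      if 0 ≤ split_range.1 ∧ split_range.1 < split_range.2 ∧ split_range.2 ≤ n then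
        acc ++ [split_range.1, split_range.2]
      else acc)
    [0]
  pairSlices input_string (boundaries ++ [n])

-- ===== PRECONDITION & SPEC =====
def Spec_split_text_at_ranges (input_string : String) (split_ranges : List (Int × Int)) (out : List String) : Prop := out = split_text_at_ranges_alt input_string split_ranges
instance (input_string : String) (split_ranges : List (Int × Int)) (out : List String) : Decidable (Spec_split_text_at_ranges input_string split_ranges out) := by unfold Spec_split_text_at_ranges; infer_instance

-- ===== CLAIM (what is proved, stated in full; the proofs are below) =====
def Claim_equal_split_text_at_ranges : Prop := ∀ (input_string : String) (split_ranges : List (Int × Int)), Dom_split_text_at_ranges input_string split_ranges → Spec_split_text_at_ranges input_string split_ranges (split_text_at_ranges input_string split_ranges)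

-- ===== LEMMAS AND PROOFS =====

-- B's boundary fold appends on the right, so the accumulator peels off.
theorem bfold_acc (n : Int) (acc : List Int) (rs : List (Int × Int)) :
    rs.foldl (fun (acc : List Int) r =>
        if 0 ≤ r.1 ∧ r.1 < r.2 ∧ r.2 ≤ n then acc ++ [r.1, r.2] else acc) acc
    = acc ++ rs.foldl (fun (acc : List Int) r =>
        if 0 ≤ r.1 ∧ r.1 < r.2 ∧ r.2 ≤ n then acc ++ [r.1, r.2] else acc) [] := by
  induction rs generalizing acc with
  | nil => simp
  | cons r rs ih =>
    simp only [List.foldl_cons]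
    rw [ih]
    conv_rhs => rw [ih]
    split_ifs <;> simp

-- For a nonnegative start, the open-ended tail slice equals the slice up to len(s).
theorem slice_none_eq_slice_len (s : String) (i : Int) (hi : 0 ≤ i) :
    PySem.Str.slice s (some i) none = PySem.Str.slice s (some i) (some (PySem.Str.len s)) := by
  apply String.toList_injective
  simp only [PySem.Str.toList_slice, PySem.Chars.slice_eq_listSlice, PySem.Str.len_eq]
  rw [PySem.List.slice_from _ hi, PySem.List.slice_toNat _ hi (Int.natCast_nonneg _)]
  rw [List.take_of_length_le (by simp)]

-- Main correspondence: A's fold from any state (res, i) with 0 ≤ i produces, after the final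
-- tail slice, exactly res followed by the pair-slices of the boundary list headed by i.
theorem loop_eq (s : String) (rs : List (Int × Int)) (res : List String) (i : Int) (hi : 0 ≤ i) :
    (rs.foldl
        (fun (st : List String × Int) r =>
          if 0 ≤ r.1 ∧ r.1 < r.2 ∧ r.2 ≤ PySem.Str.len s then
            (st.1 ++ [PySem.Str.slice s (some st.2) (some r.1)], r.2)
          else st) (res, i)).1
      ++ [PySem.Str.slice s (some (rs.foldl
        (fun (st : List String × Int) r =>
          if 0 ≤ r.1 ∧ r.1 < r.2 ∧ r.2 ≤ PySem.Str.len s then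
            (st.1 ++ [PySem.Str.slice s (some st.2) (some r.1)], r.2)
          else st) (res, i)).2) none]
    = res ++ pairSlices s ((i :: rs.foldl (fun (acc : List Int) r =>
          if 0 ≤ r.1 ∧ r.1 < r.2 ∧ r.2 ≤ PySem.Str.len s then acc ++ [r.1, r.2] else acc) [])
        ++ [PySem.Str.len s]) := by
  induction rs generalizing res i with
  | nil =>
    simp [pairSlices, slice_none_eq_slice_len s i hi]
  | cons r rs ih =>
    simp only [List.foldl_cons]
    split_ifs with h
    · rw [ih (res ++ [PySem.Str.slice s (some i) (some r.1)]) r.2 (by omega)]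
      rw [bfold_acc _ ([] ++ [r.1, r.2])]
      simp [pairSlices]
    · exact ih res i hi

-- ===== VERDICT (by name: the statement is the Claim_ definition above) =====
theorem split_text_at_ranges_spec : Claim_equal_split_text_at_ranges := by
  intro s rs _
  unfold Spec_split_text_at_ranges split_text_at_ranges split_text_at_ranges_alt
  have h := loop_eq s rs [] 0 le_rfl
  rw [show ((0 : Int) :: rs.foldl (fun (acc : List Int) r =>
      if 0 ≤ r.1 ∧ r.1 < r.2 ∧ r.2 ≤ PySem.Str.len s then acc ++ [r.1, r.2] else acc) [])
    = rs.foldl (fun (acc : List Int) r =>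
      if 0 ≤ r.1 ∧ r.1 < r.2 ∧ r.2 ≤ PySem.Str.len s then acc ++ [r.1, r.2] else acc) [0]
    from (bfold_acc _ [0] rs).symm] at h
  simpa using h
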